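-- pv_equiv track=rewrite | github.com/NemoSim/NemoSim | tests/test_simulator.py | extract_totals
-- ===== SOURCE A (Python) =====
-- def extract_totals(output: str):
--     total_syn = None
--     total_neu = None
--     for line in output.splitlines():
--         line = line.strip()
--         if line.startswith("Total synaptic energy:"):
--             total_syn = line.split(":", 1)[1].strip()
--         elif line.startswith("Total neurons energy:"):
--             total_neu = line.split(":", 1)[1].strip()
--     return total_syn, total_neu
-- ===== SOURCE B (Python) =====
-- def extract_totals(output: str):
--     # Scan lines back-to-front, keep the first match seen (== last match of the
--     # forward loop), stop early once both totals are found.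
--     total_syn = None
--     total_neu = None
--     for line in reversed(output.splitlines()):
--         s = line.strip()
--         if total_syn is None and s.startswith("Total synaptic energy:"):
--             total_syn = s.split(":", 1)[1].strip()
--         if total_neu is None and s.startswith("Total neurons energy:"):
--             total_neu = s.split(":", 1)[1].strip()
--         if total_syn is not None and total_neu is not None:
--             break
--     return total_syn, total_neu
-- ===== Notes on version B (the rewrite author's own statement) =====
-- stated objective: alternative
-- what changed: Replaces the forward overwrite loop with a back-to-front scan that keeps the first (i.e. last-in-forward-order) match per key and breaks early once both totals are found.
import Mathlib
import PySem

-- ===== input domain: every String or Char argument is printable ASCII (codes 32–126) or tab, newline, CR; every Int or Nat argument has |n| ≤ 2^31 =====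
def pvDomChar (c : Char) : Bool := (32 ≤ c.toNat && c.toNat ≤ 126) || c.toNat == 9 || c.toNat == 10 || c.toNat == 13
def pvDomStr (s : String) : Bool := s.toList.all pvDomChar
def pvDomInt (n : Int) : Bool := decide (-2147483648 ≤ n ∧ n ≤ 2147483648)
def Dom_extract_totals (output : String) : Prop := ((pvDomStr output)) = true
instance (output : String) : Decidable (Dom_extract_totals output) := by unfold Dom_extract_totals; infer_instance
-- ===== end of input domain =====

-- B does the same extraction on a back-to-front scan, keeping the first match per key
-- and breaking early once both are found (alternative structure, not claimed faster).

-- s.split(":", 1)[1].strip() — the extraction expression both Pythons share.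
-- On every reachable call s contains ':', so pyGet? is some and getD "" is never used.
def colonTail (s : String) : String :=
  PySem.Str.strip ((PySem.List.pyGet? ((PySem.Str.splitMax? s ":" 1).getD []) 1).getD "")

-- ===== PORT A =====
def extract_totals (output : String) : Option String × Option String :=
  (PySem.Str.splitlines output).foldl
    (fun acc line =>
      let l := PySem.Str.strip line
      if PySem.Str.startswith l "Total synaptic energy:" then
        (some (colonTail l), acc.2)
      else if PySem.Str.startswith l "Total neurons energy:" then
        (acc.1, some (colonTail l))
      else acc)
    (none, none)

-- ===== PORT B =====
def extractTotalsRev : List String → Option String × Option String → Option String × Option String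
  | [], acc => acc
  | line :: rest, (syn, neu) =>
    let s := PySem.Str.strip line
    let syn' := if syn.isNone && PySem.Str.startswith s "Total synaptic energy:" then
                  some (colonTail s) else syn
    let neu' := if neu.isNone && PySem.Str.startswith s "Total neurons energy:" then
                  some (colonTail s) else neu
    if syn'.isSome && neu'.isSome then (syn', neu')
    else extractTotalsRev rest (syn', neu')

def extract_totals_alt (output : String) : Option String × Option String :=
  extractTotalsRev (PySem.Str.splitlines output).reverse (none, none)

-- ===== PRECONDITION & SPEC =====
def Spec_extract_totals (output : String) (out : Option String × Option String) : Prop := out = extract_totals_alt output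
instance (output : String) (out : Option String × Option String) : Decidable (Spec_extract_totals output out) := by unfold Spec_extract_totals; infer_instance

-- ===== CLAIM (what is proved, stated in full; the proofs are below) =====
def Claim_equal_extract_totals : Prop := ∀ (output : String), Dom_extract_totals output → Spec_extract_totals output (extract_totals output)

-- ===== LEMMAS AND PROOFS =====

-- A's fold, component by component.
def foldSyn (lines : List String) : Option String :=
  lines.foldl (fun a line =>
    let l := PySem.Str.strip line
    if PySem.Str.startswith l "Total synaptic energy:" then some (colonTail l) else a) none

def foldNeu (lines : List String) : Option String :=
  lines.foldl (fun a line =>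
    let l := PySem.Str.strip line
    if PySem.Str.startswith l "Total neurons energy:" then some (colonTail l) else a) none

-- the two prefixes cannot both match one line
theorem sw_disjoint (s : String) :
    PySem.Str.startswith s "Total synaptic energy:" = true →
    PySem.Str.startswith s "Total neurons energy:" = false := by
  intro h1
  by_contra h2
  rw [Bool.not_eq_false] at h2
  rw [PySem.Str.startswith_eq, PySem.Chars.startswith_iff] at h1 h2
  exact absurd (List.prefix_or_prefix_of_prefix h1 h2) (by decide)

theorem or_ite_none {α : Type} (c : Bool) (a : α) (t : Option α) :
    (Option.or (if c then some a else none) t) = if c then some a else t := by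
  cases c <;> simp

theorem fold_pair (lines : List String) (s n : Option String) :
    lines.foldl
      (fun acc line =>
        let l := PySem.Str.strip line
        if PySem.Str.startswith l "Total synaptic energy:" then
          (some (colonTail l), acc.2)
        else if PySem.Str.startswith l "Total neurons energy:" then
          (acc.1, some (colonTail l))
        else acc) (s, n)
    = (lines.foldl (fun a line =>
         let l := PySem.Str.strip line
         if PySem.Str.startswith l "Total synaptic energy:" then some (colonTail l) else a) s,
       lines.foldl (fun a line =>
         let l := PySem.Str.strip line
         if PySem.Str.startswith l "Total neurons energy:" then some (colonTail l) else a) n) := by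
  induction lines generalizing s n with
  | nil => rfl
  | cons x rest ih =>
    simp only [List.foldl_cons]
    by_cases h1 : PySem.Str.startswith (PySem.Str.strip x) "Total synaptic energy:" = true
    · have h2 := sw_disjoint _ h1
      simp only [h1, h2, Bool.false_eq_true, reduceIte]
      exact ih _ _
    · simp only [Bool.not_eq_true] at h1
      by_cases h2 : PySem.Str.startswith (PySem.Str.strip x) "Total neurons energy:" = true
      · simp only [h1, h2, Bool.false_eq_true, reduceIte]
        exact ih _ _
      · simp only [Bool.not_eq_true] at h2
        simp only [h1, h2, Bool.false_eq_true, reduceIte]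
        exact ih _ _

theorem rev_or (rev : List String) (syn neu : Option String) :
    extractTotalsRev rev (syn, neu)
      = (syn.or (foldSyn rev.reverse), neu.or (foldNeu rev.reverse)) := by
  induction rev generalizing syn neu with
  | nil => simp [extractTotalsRev, foldSyn, foldNeu]
  | cons x rest ih =>
    simp only [extractTotalsRev]
    have hsyn : ∀ t : Option String,
        ((if syn.isNone && PySem.Str.startswith (PySem.Str.strip x) "Total synaptic energy:" then
            some (colonTail (PySem.Str.strip x)) else syn).or t)
          = syn.or (if PySem.Str.startswith (PySem.Str.strip x) "Total synaptic energy:" then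
              some (colonTail (PySem.Str.strip x)) else t) := by
      intro t; cases syn
      · simp only [Option.isNone_none, Bool.true_and, or_ite_none, Option.none_or]
      · simp only [Option.isNone_some, Bool.false_and, Bool.false_eq_true, if_false,
          Option.some_or]
    have hneu : ∀ t : Option String,
        ((if neu.isNone && PySem.Str.startswith (PySem.Str.strip x) "Total neurons energy:" then
            some (colonTail (PySem.Str.strip x)) else neu).or t)
          = neu.or (if PySem.Str.startswith (PySem.Str.strip x) "Total neurons energy:" then
              some (colonTail (PySem.Str.strip x)) else t) := by
      intro t; cases neu
      · simp only [Option.isNone_none, Bool.true_and, or_ite_none, Option.none_or]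
      · simp only [Option.isNone_some, Bool.false_and, Bool.false_eq_true, if_false,
          Option.some_or]
    have hfoldS : foldSyn (rest.reverse ++ [x])
        = if PySem.Str.startswith (PySem.Str.strip x) "Total synaptic energy:" then
            some (colonTail (PySem.Str.strip x)) else foldSyn rest.reverse := by
      simp only [foldSyn, List.foldl_append, List.foldl_cons, List.foldl_nil]
    have hfoldN : foldNeu (rest.reverse ++ [x])
        = if PySem.Str.startswith (PySem.Str.strip x) "Total neurons energy:" then
            some (colonTail (PySem.Str.strip x)) else foldNeu rest.reverse := by
      simp only [foldNeu, List.foldl_append, List.foldl_cons, List.foldl_nil]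
    by_cases hb : ((if syn.isNone && PySem.Str.startswith (PySem.Str.strip x) "Total synaptic energy:" then
            some (colonTail (PySem.Str.strip x)) else syn).isSome
        && (if neu.isNone && PySem.Str.startswith (PySem.Str.strip x) "Total neurons energy:" then
            some (colonTail (PySem.Str.strip x)) else neu).isSome) = true
    · -- early break: both components are some, .or keeps them
      rw [if_pos hb]
      rw [Bool.and_eq_true] at hb
      rw [List.reverse_cons, hfoldS, hfoldN, ← hsyn, ← hneu]
      obtain ⟨b1, b2⟩ := hb
      rw [Option.isSome_iff_exists] at b1 b2
      obtain ⟨v, hv⟩ := b1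
      obtain ⟨w, hw⟩ := b2
      rw [hv, hw, Option.some_or, Option.some_or]
    · rw [if_neg hb, ih, List.reverse_cons, hfoldS, hfoldN, hsyn, hneu]

-- ===== VERDICT (by name: the statement is the Claim_ definition above) =====
theorem extract_totals_spec : Claim_equal_extract_totals := by
  intro output _
  show extract_totals output = extract_totals_alt output
  unfold extract_totals extract_totals_alt
  rw [rev_or, List.reverse_reverse, fold_pair]
  simp only [foldSyn, foldNeu, Option.none_or]
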